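-- pv_equiv track=rewrite | github.com/wasabi9/Resume-Summarization-and-Scoring | CLI-Tool/cli_tool/cli.py | des_score
-- ===== SOURCE A (Python) =====
-- def des_score(resume):
--     des_score = 0
--
--     for word in resume.split(" "):
--         if word.strip() in ["Sr.","Senior"]:
--             if des_score<3:
--                 des_score=3
--         elif word.strip() in ["Associate", "Scientist", "Engineer"]:
--             if des_score<2:
--                 des_score=2
--         elif word.strip() in ["Analyst", "Junior"]:
--             if des_score<1:
--                 des_score=1
--     return des_score
-- ===== SOURCE B (Python) =====
-- def des_score(resume):
--     present = {w.strip() for w in resume.split(" ")}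
--     if present & {"Sr.", "Senior"}:
--         return 3
--     if present & {"Associate", "Scientist", "Engineer"}:
--         return 2
--     if present & {"Analyst", "Junior"}:
--         return 1
--     return 0
-- ===== Notes on version B (the rewrite author's own statement) =====
-- stated objective: simpler
-- what changed: Replaces A's per-word branch-and-bump max loop by building the set of stripped tokens once and probing the tiers highest-first with early returns.
import Mathlib
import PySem

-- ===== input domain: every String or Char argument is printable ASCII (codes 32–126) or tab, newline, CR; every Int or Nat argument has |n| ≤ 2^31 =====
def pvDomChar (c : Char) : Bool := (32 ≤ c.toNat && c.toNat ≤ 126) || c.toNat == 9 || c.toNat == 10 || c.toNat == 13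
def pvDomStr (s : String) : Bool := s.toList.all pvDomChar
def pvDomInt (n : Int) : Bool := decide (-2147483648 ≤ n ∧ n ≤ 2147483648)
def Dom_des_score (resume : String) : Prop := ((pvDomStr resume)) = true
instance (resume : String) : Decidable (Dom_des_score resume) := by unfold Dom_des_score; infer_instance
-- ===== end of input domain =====

-- B is simpler: it builds the set of stripped tokens once and probes the tiers highest-first
-- with early returns, instead of A's per-word branch-and-bump max loop.

-- ===== PORT A =====
def des_score (resume : String) : Int :=
  ((PySem.Str.split? resume " ").getD []).foldl (fun acc word =>
    if PySem.Str.strip word ∈ ["Sr.", "Senior"] then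
      if acc < 3 then 3 else acc
    else if PySem.Str.strip word ∈ ["Associate", "Scientist", "Engineer"] then
      if acc < 2 then 2 else acc
    else if PySem.Str.strip word ∈ ["Analyst", "Junior"] then
      if acc < 1 then 1 else acc
    else acc) 0

-- ===== PORT B =====
def des_score_alt (resume : String) : Int :=
  let present : PySem.Set String :=
    PySem.Set.ofList (((PySem.Str.split? resume " ").getD []).map PySem.Str.strip)
  if PySem.Set.contains present "Sr." || PySem.Set.contains present "Senior" then 3
  else if PySem.Set.contains present "Associate" || PySem.Set.contains present "Scientist"
       || PySem.Set.contains present "Engineer" then 2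
  else if PySem.Set.contains present "Analyst" || PySem.Set.contains present "Junior" then 1
  else 0

-- ===== PRECONDITION & SPEC =====
def Spec_des_score (resume : String) (out : Int) : Prop := out = des_score_alt resume
instance (resume : String) (out : Int) : Decidable (Spec_des_score resume out) := by unfold Spec_des_score; infer_instance

-- ===== CLAIM (what is proved, stated in full; the proofs are below) =====
def Claim_equal_des_score : Prop := ∀ (resume : String), Dom_des_score resume → Spec_des_score resume (des_score resume)

-- ===== LEMMAS AND PROOFS =====

-- the tier of a single (already stripped) token
def pvTier (t : String) : Int :=
  if t ∈ ["Sr.", "Senior"] then 3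
  else if t ∈ ["Associate", "Scientist", "Engineer"] then 2
  else if t ∈ ["Analyst", "Junior"] then 1
  else 0

-- B's descending probe, phrased on a plain token list
def pvBest (ts : List String) : Int :=
  if ts.contains "Sr." || ts.contains "Senior" then 3
  else if ts.contains "Associate" || ts.contains "Scientist" || ts.contains "Engineer" then 2
  else if ts.contains "Analyst" || ts.contains "Junior" then 1
  else 0

lemma pvBest_cons (t : String) (ts : List String) :
    pvBest (t :: ts) = max (pvTier t) (pvBest ts) := by
  simp only [pvBest, pvTier, List.contains_cons, List.mem_cons, 
    List.not_mem_nil, or_false]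
  by_cases h1 : t = "Sr." <;> by_cases h2 : t = "Senior" <;>
  by_cases h3 : t = "Associate" <;> by_cases h4 : t = "Scientist" <;>
  by_cases h5 : t = "Engineer" <;> by_cases h6 : t = "Analyst" <;>
  by_cases h7 : t = "Junior" <;>
    simp_all [max_def] <;> split_ifs <;> first | omega | tauto

-- A's loop keeps a running max of the tiers seen, so from a nonnegative
-- accumulator it computes max acc (pvBest of the stripped words)
lemma pv_foldl_A_eq_best (ws : List String) (acc : Int) (h : 0 ≤ acc) :
    ws.foldl (fun a w =>
      if PySem.Str.strip w ∈ ["Sr.", "Senior"] then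
        if a < 3 then 3 else a
      else if PySem.Str.strip w ∈ ["Associate", "Scientist", "Engineer"] then
        if a < 2 then 2 else a
      else if PySem.Str.strip w ∈ ["Analyst", "Junior"] then
        if a < 1 then 1 else a
      else a) acc = max acc (pvBest (ws.map PySem.Str.strip)) := by
  induction ws generalizing acc with
  | nil => simp [pvBest, max_eq_left h]
  | cons w ws ih =>
    have hstep :
        (if PySem.Str.strip w ∈ ["Sr.", "Senior"] then
          if acc < 3 then 3 else acc
        else if PySem.Str.strip w ∈ ["Associate", "Scientist", "Engineer"] then
          if acc < 2 then 2 else acc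
        else if PySem.Str.strip w ∈ ["Analyst", "Junior"] then
          if acc < 1 then 1 else acc
        else acc) = max acc (pvTier (PySem.Str.strip w)) := by
      unfold pvTier
      split_ifs <;> rw [max_def] <;> split_ifs <;> omega
    rw [List.foldl_cons, hstep, ih _ (le_max_of_le_left h), List.map_cons,
      pvBest_cons, max_assoc]

-- ===== VERDICT (by name: the statement is the Claim_ definition above) =====
theorem des_score_spec : Claim_equal_des_score := by
  intro resume _
  unfold Spec_des_score des_score des_score_alt
  rw [pv_foldl_A_eq_best _ 0 le_rfl]
  simp [PySem.Set.contains_eq_listContains, pvBest]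
  split_ifs <;> simp_all
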